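-- pv_equiv track=rewrite | github.com/mariahbf/Backtracking | simetria_equivalente.py | validate_standoff
-- ===== SOURCE A (Python) =====
-- DIRECTIONS = [(-1, 0), (1, 0), (0, -1), (0, 1),  # Up, Down, Left, Right
--               (-1, -1), (-1, 1), (1, -1), (1, 1)]  # Diagonals
--
-- def count_enemies_in_sight(board, i, j, gang):
--     n = len(board)
--     enemy_gang = 'B' if gang == 'P' else 'P'
--     enemies_in_sight = 0
--
--     for dx, dy in DIRECTIONS:
--         ni, nj = i + dx, j + dy
--
--         while 0 <= ni < n and 0 <= nj < n:
--             if board[ni][nj] == gang: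
--                 # If we hit a shooter from the same gang, it's invalid
--                 return -1
--             elif board[ni][nj] == enemy_gang:
--                 enemies_in_sight += 1
--                 break  # Stop once we've found an enemy in this direction
--
--             # Move further in the current direction
--             ni += dx
--             nj += dy
--
--     return enemies_in_sight
--
-- def validate_standoff(board):
--     n = len(board)
--
--     for i in range(n):
--         for j in range(n):
--             if board[i][j] in ('B', 'P'):  # If there's a shooter in this cell
--                 gang = board[i][j]
--
--                 enemies_in_sight = count_enemies_in_sight(board, i, j, gang)
--
--                 if enemies_in_sight == -1 or enemies_in_sight < 2:
--                     return False
--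
--     return True
-- ===== SOURCE B (Python) =====
-- SHOOTERS = ('B', 'P')
--
-- def _shift_combine(brow, ref, dy, n):
--     # new[j] = brow[j+dy] if it is a shooter, else ref[j+dy]; None when j+dy out of range
--     new = []
--     for j in range(n):
--         k = j + dy
--         if 0 <= k < n:
--             c = brow[k]
--             new.append(c if c in SHOOTERS else ref[k])
--         else:
--             new.append(None)
--     return new
--
-- def _table_up(board, n, dy):
--     # t[i][j] = first shooter strictly beyond (i, j) in direction (-1, dy), or None
--     t, prev = [], [None] * n
--     for i in range(n):
--         t.append(prev)
--         prev = _shift_combine(board[i], prev, dy, n)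
--     return t
--
-- def _table_down(board, n, dy):
--     rows = list(reversed(board))
--     return list(reversed(_table_up(rows, n, dy)))
--
-- def _row_scan_left(row, n):
--     # s[j] = nearest shooter in row at an index < j, or None
--     s, prev = [], None
--     for j in range(n):
--         s.append(prev)
--         c = row[j]
--         prev = c if c in SHOOTERS else prev
--     return s
--
-- def _row_scan_right(row, n):
--     return list(reversed(_row_scan_left(list(reversed(row[:n])), n)))
--
-- def validate_standoff(board):
--     n = len(board)
--     tables = [
--         _table_up(board, n, 0),
--         _table_down(board, n, 0),
--         [_row_scan_left(board[i], n) for i in range(n)],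
--         [_row_scan_right(board[i], n) for i in range(n)],
--         _table_up(board, n, -1),
--         _table_up(board, n, 1),
--         _table_down(board, n, -1),
--         _table_down(board, n, 1),
--     ]
--     for i in range(n):
--         for j in range(n):
--             g = board[i][j]
--             if g in SHOOTERS:
--                 firsts = [t[i][j] for t in tables]
--                 if g in firsts:
--                     return False
--                 enemy = 'B' if g == 'P' else 'P'
--                 if firsts.count(enemy) < 2:
--                     return False
--     return True
-- ===== Notes on version B (the rewrite author's own statement) =====
-- stated objective: alternative
-- what changed: A ray-casts from every shooter in all 8 directions; B precomputes, per direction, a dynamic-programming table of the nearest shooter visible from each cell (one pass per direction) and validates every shooter with 8 table lookups.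
-- outside the precondition, e.g. on validate_standoff([['B', 'x'], ['B']]): A returns False, B raises IndexError; on validate_standoff([['B', 'P'], ['P']]): A raises IndexError, B raises IndexError
import Mathlib
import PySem

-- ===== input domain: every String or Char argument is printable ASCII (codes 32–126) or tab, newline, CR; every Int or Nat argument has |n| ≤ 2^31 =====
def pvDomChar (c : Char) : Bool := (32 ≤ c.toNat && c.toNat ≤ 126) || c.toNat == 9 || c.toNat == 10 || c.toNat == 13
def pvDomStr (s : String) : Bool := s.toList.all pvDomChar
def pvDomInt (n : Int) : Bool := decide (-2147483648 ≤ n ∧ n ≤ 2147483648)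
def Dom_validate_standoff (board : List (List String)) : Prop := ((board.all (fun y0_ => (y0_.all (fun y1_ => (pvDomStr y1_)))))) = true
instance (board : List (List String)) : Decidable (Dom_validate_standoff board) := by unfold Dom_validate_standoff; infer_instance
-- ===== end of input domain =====

-- B replaces A's per-shooter ray casting by eight per-direction dynamic-programming
-- tables of the nearest visible shooter, so each shooter is validated by table lookups
-- (objective: alternative algorithm; not measured faster on the generated inputs).
-- Equivalence is proved on boards whose rows all have length ≥ len(board) (Pre_), the
-- boards on which A cannot raise IndexError.

-- ===== PORT A =====
def vsCell (board : List (List String)) (ni nj : Int) : String :=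
  (board.getD ni.toNat []).getD nj.toNat ""

def vsInb (n ni nj : Int) : Bool :=
  decide (0 ≤ ni) && decide (ni < n) && decide (0 ≤ nj) && decide (nj < n)

-- the inner `while` of count_enemies_in_sight; `none` models the `return -1` path,
-- `some d` the normal exit adding d to the enemy counter
def vsWalk (board : List (List String)) (n : Int) (gang enemy : String)
    (dx dy : Int) : Nat → Int → Int → Option Int
  | 0, _, _ => some 0
  | f + 1, ni, nj =>
    if vsInb n ni nj then
      if vsCell board ni nj = gang then none
      else if vsCell board ni nj = enemy then some 1
      else vsWalk board n gang enemy dx dy f (ni + dx) (nj + dy)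
    else some 0

def vsDirs : List (Int × Int) :=
  [(-1, 0), (1, 0), (0, -1), (0, 1), (-1, -1), (-1, 1), (1, -1), (1, 1)]

def vsCountGo (board : List (List String)) (n : Int) (gang enemy : String)
    (i j : Int) : List (Int × Int) → Int → Int
  | [], acc => acc
  | (dx, dy) :: rest, acc =>
    match vsWalk board n gang enemy dx dy (n.toNat + 1) (i + dx) (j + dy) with
    | none => -1
    | some d => vsCountGo board n gang enemy i j rest (acc + d)

def count_enemies_in_sight (board : List (List String)) (i j : Int) (gang : String) : Int :=
  let n : Int := board.length
  let enemy : String := if gang = "P" then "B" else "P"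
  vsCountGo board n gang enemy i j vsDirs 0

def validate_standoff (board : List (List String)) : Bool :=
  let n := board.length
  (List.range n).all fun i => (List.range n).all fun j =>
    let c := (board.getD i []).getD j ""
    if c = "B" ∨ c = "P" then
      let e := count_enemies_in_sight board (i : Int) (j : Int) c
      !(decide (e = -1) || decide (e < 2))
    else true

-- ===== PORT B =====
def vsShooter (c : String) : Bool := c = "B" || c = "P"

def vsShiftCombine (brow : List String) (ref : List (Option String)) (dy : Int) (n : Nat) :
    List (Option String) :=
  (List.range n).map fun (j : Nat) =>
    let k : Int := (j : Int) + dy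
    if 0 ≤ k ∧ k < (n : Int) then
      let c := brow.getD k.toNat ""
      if vsShooter c then some c else ref.getD k.toNat none
    else none

def vsTableUpGo (n : Nat) (dy : Int) (prev : List (Option String)) :
    List (List String) → List (List (Option String))
  | [] => []
  | brow :: rest => prev :: vsTableUpGo n dy (vsShiftCombine brow prev dy n) rest

def vsTableUp (board : List (List String)) (n : Nat) (dy : Int) : List (List (Option String)) :=
  vsTableUpGo n dy (List.replicate n none) board

def vsTableDown (board : List (List String)) (n : Nat) (dy : Int) : List (List (Option String)) :=
  (vsTableUp board.reverse n dy).reverse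

def vsRowScanGo (prev : Option String) : List String → List (Option String)
  | [] => []
  | c :: rest => prev :: vsRowScanGo (if vsShooter c then some c else prev) rest

def vsRowScanLeft (row : List String) (n : Nat) : List (Option String) :=
  vsRowScanGo none (row.take n)

def vsRowScanRight (row : List String) (n : Nat) : List (Option String) :=
  (vsRowScanGo none (row.take n).reverse).reverse

def validate_standoff_alt (board : List (List String)) : Bool :=
  let n := board.length
  let tables : List (List (List (Option String))) :=
    [vsTableUp board n 0, vsTableDown board n 0,
     board.map (fun r => vsRowScanLeft r n), board.map (fun r => vsRowScanRight r n),
     vsTableUp board n (-1), vsTableUp board n 1,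
     vsTableDown board n (-1), vsTableDown board n 1]
  (List.range n).all fun i => (List.range n).all fun j =>
    let g := (board.getD i []).getD j ""
    if vsShooter g then
      let firsts := tables.map fun t => (t.getD i []).getD j none
      if firsts.contains (some g) then false
      else
        let enemy : String := if g = "P" then "B" else "P"
        decide (2 ≤ firsts.count (some enemy))
    else true

-- ===== PRECONDITION & SPEC =====
-- Pre_ excludes ragged boards with a row shorter than len(board): there A raises
-- IndexError on most of them, but on some of them A happens to return False before
-- touching a missing cell, so Pre_ is slightly narrower than the raising set.
def Pre_validate_standoff (board : List (List String)) : Prop :=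
  ∀ row ∈ board, board.length ≤ row.length
instance (board : List (List String)) : Decidable (Pre_validate_standoff board) := by
  unfold Pre_validate_standoff; infer_instance

def pvWitness_validate_standoff : List (List String) := [["B", "P"], ["P", "B"]]

def Spec_validate_standoff (board : List (List String)) (out : Bool) : Prop :=
  out = validate_standoff_alt board
instance (board : List (List String)) (out : Bool) : Decidable (Spec_validate_standoff board out) := by
  unfold Spec_validate_standoff; infer_instance

-- ===== CLAIM (what is proved, stated in full; the proofs are below) =====
def Claim_equal_validate_standoff : Prop := ∀ (board : List (List String)), Dom_validate_standoff board → Pre_validate_standoff board → Spec_validate_standoff board (validate_standoff board)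

-- ===== LEMMAS AND PROOFS =====

-- first shooter cell met from (i, j) inclusive, walking in direction (dx, dy); fueled
def fscan (board : List (List String)) (n dx dy : Int) : Nat → Int → Int → Option String
  | 0, _, _ => none
  | f + 1, i, j =>
    if vsInb n i j then
      if vsShooter (vsCell board i j) then some (vsCell board i j)
      else fscan board n dx dy f (i + dx) (j + dy)
    else none

-- first shooter at (i, j) or further up (row decreasing, column moving by dy)
def gUp (board : List (List String)) (n dy : Int) : Nat → Int → Option String
  | 0, j =>
    if 0 ≤ j ∧ j < n then
      (if vsShooter (vsCell board 0 j) then some (vsCell board 0 j) else none)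
    else none
  | i + 1, j =>
    if 0 ≤ j ∧ j < n then
      (if vsShooter (vsCell board ((i : Int) + 1) j) then some (vsCell board ((i : Int) + 1) j)
       else gUp board n dy i (j + dy))
    else none

-- first shooter in row at an index < j, nearest first
def gL (row : List String) : Nat → Option String
  | 0 => none
  | j + 1 => if vsShooter (row.getD j "") then some (row.getD j "") else gL row j

-- value a row of an up-table should carry at row index k, column argument already shifted
def PspecUp (board : List (List String)) (n dy : Int) (k : Nat) (j : Int) : Option String :=
  match k with
  | 0 => none
  | k' + 1 => gUp board n dy k' j

theorem vsInb_eq (n i j : Int) :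
    vsInb n i j = decide (0 ≤ i ∧ i < n ∧ 0 ≤ j ∧ j < n) := by
  simp [vsInb, Bool.decide_and, Bool.and_assoc]

theorem fscan_oob (board : List (List String)) (n dx dy : Int) (f : Nat) (i j : Int)
    (h : ¬(0 ≤ i ∧ i < n ∧ 0 ≤ j ∧ j < n)) :
    fscan board n dx dy f i j = none := by
  cases f with
  | zero => rfl
  | succ f => simp [fscan, vsInb_eq, h]

theorem fscan_shooter (board : List (List String)) (n dx dy : Int) :
    ∀ (f : Nat) (i j : Int) (c : String),
      fscan board n dx dy f i j = some c → vsShooter c = true := by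
  intro f
  induction f with
  | zero => intro i j c h; simp [fscan] at h
  | succ f ih =>
    intro i j c h
    by_cases hb : vsInb n i j = true
    · by_cases hs : vsShooter (vsCell board i j) = true
      · simp [fscan, hb, hs] at h; simpa [← h] using hs
      · simp [fscan, hb, hs] at h; exact ih _ _ _ h
    · simp [fscan, hb] at h

theorem walk_eq (board : List (List String)) (n : Int) (gang enemy : String)
    (hg : (gang = "B" ∧ enemy = "P") ∨ (gang = "P" ∧ enemy = "B")) (dx dy : Int) :
    ∀ (f : Nat) (ni nj : Int),
      vsWalk board n gang enemy dx dy f ni nj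
        = match fscan board n dx dy f ni nj with
          | none => some 0
          | some c => if c = gang then none else some 1 := by
  intro f
  induction f with
  | zero => intro ni nj; simp [vsWalk, fscan]
  | succ f ih =>
    intro ni nj
    by_cases hb : vsInb n ni nj = true
    · by_cases hgang : vsCell board ni nj = gang
      · have hs : vsShooter gang = true := by
          rcases hg with ⟨h1, h2⟩ | ⟨h1, h2⟩ <;> simp [vsShooter, h1]
        simp [vsWalk, fscan, hb, hgang, hs]
      · by_cases hen : vsCell board ni nj = enemy
        · have hs : vsShooter enemy = true := by
            rcases hg with ⟨h1, h2⟩ | ⟨h1, h2⟩ <;> simp [vsShooter, h2]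
          have hne : ¬(enemy = gang) := by
            rcases hg with ⟨h1, h2⟩ | ⟨h1, h2⟩ <;> simp [h1, h2]
          simp [vsWalk, fscan, hb, hen, hs, hne]
        · have hs : vsShooter (vsCell board ni nj) = false := by
            rcases hg with ⟨h1, h2⟩ | ⟨h1, h2⟩ <;> subst h1 <;> subst h2 <;>
              simp [vsShooter, hgang, hen]
          simp [vsWalk, fscan, hb, hgang, hen, hs, ih]
    · simp [vsWalk, fscan, hb]

theorem countGo_eq (board : List (List String)) (n : Int) (gang enemy : String)
    (hg : (gang = "B" ∧ enemy = "P") ∨ (gang = "P" ∧ enemy = "B")) (i j : Int) :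
    ∀ (ds : List (Int × Int)) (acc : Int),
      vsCountGo board n gang enemy i j ds acc
        = if ds.any (fun d => fscan board n d.1 d.2 (n.toNat + 1) (i + d.1) (j + d.2) == some gang)
          then -1
          else acc + (ds.countP
            (fun d => fscan board n d.1 d.2 (n.toNat + 1) (i + d.1) (j + d.2) == some enemy) : Int) := by
  intro ds
  induction ds with
  | nil => intro acc; simp [vsCountGo]
  | cons d rest ih =>
    intro acc
    obtain ⟨dx, dy⟩ := d
    have hw := walk_eq board n gang enemy hg dx dy (n.toNat + 1) (i + dx) (j + dy)
    rcases hfs : fscan board n dx dy (n.toNat + 1) (i + dx) (j + dy) with _ | c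
    · rw [hfs] at hw
      simp only [vsCountGo, hw]
      rw [ih]
      simp only [List.any_cons, List.countP_cons, hfs]
      by_cases ha : (rest.any fun d =>
          fscan board n d.1 d.2 (n.toNat + 1) (i + d.1) (j + d.2) == some gang) = true
      · simp [ha]
      · simp [ha]
    · rw [hfs] at hw
      have hsh : vsShooter c = true := fscan_shooter board n dx dy _ _ _ _ hfs
      by_cases hcg : c = gang
      · simp only [vsCountGo, hw, hcg]
        simp only [List.any_cons, hfs, hcg]
        simp
      · have hce : c = enemy := by
          rcases hg with ⟨h1, h2⟩ | ⟨h1, h2⟩ <;> subst h1 <;> subst h2 <;>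
            simp [vsShooter] at hsh <;> tauto
        have hneg : ¬(enemy = gang) := hce ▸ hcg
        simp only [vsCountGo, hw, if_neg hcg]
        rw [ih]
        simp only [List.any_cons, List.countP_cons, hfs, hce]
        by_cases ha : (rest.any fun d =>
            fscan board n d.1 d.2 (n.toNat + 1) (i + d.1) (j + d.2) == some gang) = true
        · simp [ha]
        · simp [ha, hneg]
          ring

theorem fscan_up (board : List (List String)) (n dy : Int) :
    ∀ (i : Nat) (f : Nat) (j : Int), (i : Int) < n → i < f →
      fscan board n (-1) dy f (i : Int) j = gUp board n dy i j := by
  intro i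
  induction i with
  | zero =>
    intro f j h1 h2
    obtain ⟨f, rfl⟩ : ∃ f', f = f' + 1 := ⟨f - 1, by omega⟩
    push_cast
    by_cases hj : 0 ≤ j ∧ j < n
    · have hb : vsInb n 0 j = true := by
        rw [vsInb_eq]; simp only [decide_eq_true_eq]; omega
      by_cases hs : vsShooter (vsCell board 0 j) = true
      · simp [fscan, gUp, hb, hj, hs]
      · have hrec : fscan board n (-1) dy f (-1) (j + dy) = none :=
          fscan_oob _ _ _ _ _ _ _ (by omega)
        simp [fscan, gUp, hb, hj, hs, hrec]
    · have hb : vsInb n 0 j = false := by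
        rw [vsInb_eq]; simp only [decide_eq_false_iff_not]; omega
      simp [fscan, gUp, hb, hj]
  | succ i ih =>
    intro f j h1 h2
    obtain ⟨f, rfl⟩ : ∃ f', f = f' + 1 := ⟨f - 1, by omega⟩
    push_cast
    push_cast at h1
    by_cases hj : 0 ≤ j ∧ j < n
    · have hb : vsInb n ((i : Int) + 1) j = true := by
        rw [vsInb_eq]; simp only [decide_eq_true_eq]; omega
      have hrec : fscan board n (-1) dy f (i : Int) (j + dy)
          = gUp board n dy i (j + dy) := ih f (j + dy) (by omega) (by omega)
      by_cases hs : vsShooter (vsCell board ((i : Int) + 1) j) = true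
      · simp [fscan, gUp, hb, hj, hs]
      · simp [fscan, gUp, hb, hj, hs, hrec]
    · have hb : vsInb n ((i : Int) + 1) j = false := by
        rw [vsInb_eq]; simp only [decide_eq_false_iff_not]; omega
      simp [fscan, gUp, hb, hj]

theorem cell_reverse (board : List (List String)) (i j : Int)
    (hi : 0 ≤ i) (hi2 : i < (board.length : Int)) :
    vsCell board.reverse ((board.length : Int) - 1 - i) j = vsCell board i j := by
  unfold vsCell
  have hk : i.toNat < board.length := by omega
  have h1 : ((board.length : Int) - 1 - i).toNat = board.length - 1 - i.toNat := by omega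
  rw [h1]
  congr 1
  have h2 : board.length - 1 - i.toNat < board.length := by omega
  rw [List.getD_eq_getElem?_getD, List.getD_eq_getElem?_getD,
    List.getElem?_reverse (by simpa using h2)]
  congr 2
  omega

theorem fscan_down (board : List (List String)) (dy : Int) :
    ∀ (f : Nat) (i j : Int),
      fscan board (board.length : Int) 1 dy f i j
        = fscan board.reverse (board.length : Int) (-1) dy f ((board.length : Int) - 1 - i) j := by
  intro f
  induction f with
  | zero => intro i j; rfl
  | succ f ih =>
    intro i j
    have hb : vsInb (board.length : Int) ((board.length : Int) - 1 - i) j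
        = vsInb (board.length : Int) i j := by
      rw [vsInb_eq, vsInb_eq, decide_eq_decide]; omega
    by_cases h : vsInb (board.length : Int) i j = true
    · have hin : 0 ≤ i ∧ i < (board.length : Int) := by
        rw [vsInb_eq] at h; simp only [decide_eq_true_eq] at h; exact ⟨h.1, h.2.1⟩
      have hc := cell_reverse board i j hin.1 hin.2
      have e : (board.length : Int) - 1 - i + -1 = (board.length : Int) - 1 - (i + 1) := by ring
      simp only [fscan, hb, h, if_pos, hc, e]
      rw [ih (i + 1) (j + dy)]
    · simp [fscan, hb, h]

theorem fscan_left (board : List (List String)) (n : Int) (i : Int)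
    (hi : 0 ≤ i ∧ i < n) :
    ∀ (j : Nat) (f : Nat), j < f → (j : Int) ≤ n →
      fscan board n 0 (-1) f i ((j : Int) - 1) = gL (board.getD i.toNat []) j := by
  intro j
  induction j with
  | zero =>
    intro f hf hjn
    rw [show ((0 : Nat) : Int) - 1 = -1 by simp]
    rw [fscan_oob board n 0 (-1) f i (-1) (by omega)]
    rfl
  | succ j ih =>
    intro f hf hjn
    obtain ⟨f, rfl⟩ : ∃ f', f = f' + 1 := ⟨f - 1, by omega⟩
    rw [show ((j + 1 : Nat) : Int) - 1 = (j : Int) by push_cast; ring]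
    push_cast at hjn
    have hb : vsInb n i (j : Int) = true := by
      rw [vsInb_eq]; simp only [decide_eq_true_eq]
      refine ⟨hi.1, hi.2, by omega, by omega⟩
    have hcell : vsCell board i (j : Int) = (board.getD i.toNat []).getD j "" := by
      unfold vsCell; simp
    by_cases hs : vsShooter ((board.getD i.toNat []).getD j "") = true
    · have hs' := hs
      simp only [List.getD_eq_getElem?_getD] at hs'
      simp [fscan, gL, hb, hcell, hs']
    · have hs' := hs
      simp only [List.getD_eq_getElem?_getD] at hs'
      have hrec : fscan board n 0 (-1) f i ((j : Int) + -1)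
          = gL (board.getD i.toNat []) j := by
        rw [show (j : Int) + -1 = (j : Int) - 1 by ring]
        exact ih f (by omega) (by omega)
      simp only [List.getD_eq_getElem?_getD] at hrec
      simp [fscan, gL, hb, hcell, hs', hrec]

theorem fscan_right (board : List (List String)) (i : Int) (row : List String)
    (hi : 0 ≤ i ∧ i < (board.length : Int))
    (hrow : row = board.getD i.toNat []) (hlen : board.length ≤ row.length) :
    ∀ (m : Nat) (j f : Nat), (j : Int) + m = (board.length : Int) → m < f →
      fscan board (board.length : Int) 0 1 f i (j : Int)
        = gL (row.take board.length).reverse m := by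
  intro m
  induction m with
  | zero =>
    intro j f hjm hf
    rw [fscan_oob board (board.length : Int) 0 1 f i (j : Int) (by omega)]
    rfl
  | succ m ih =>
    intro j f hjm hf
    obtain ⟨f, rfl⟩ : ∃ f', f = f' + 1 := ⟨f - 1, by omega⟩
    have hjN : j + m + 1 = board.length := by push_cast at hjm; omega
    have hb : vsInb (board.length : Int) i (j : Int) = true := by
      rw [vsInb_eq]; simp only [decide_eq_true_eq]
      refine ⟨hi.1, hi.2, by omega, by omega⟩
    have htlen : (row.take board.length).length = board.length := by
      simp; omega
    have hcrop : ((row.take board.length).reverse).getD m "" = row.getD j "" := by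
      rw [List.getD_eq_getElem?_getD, List.getD_eq_getElem?_getD,
        List.getElem?_reverse (by rw [htlen]; omega)]
      rw [htlen, show board.length - 1 - m = j by omega]
      rw [List.getElem?_take_of_lt (by omega)]
    simp only [List.getD_eq_getElem?_getD] at hcrop
    have hcell : vsCell board i (j : Int) = row.getD j "" := by
      unfold vsCell; rw [hrow]; simp
    by_cases hs : vsShooter (row.getD j "") = true
    · have hs' := hs
      simp only [List.getD_eq_getElem?_getD] at hs'
      simp [fscan, gL, hb, hcell, hcrop, hs']
    · have hs' := hs
      simp only [List.getD_eq_getElem?_getD] at hs'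
      have hrec : fscan board (board.length : Int) 0 1 f i ((j : Int) + 1)
          = gL (row.take board.length).reverse m := by
        rw [show (j : Int) + 1 = ((j + 1 : Nat) : Int) by push_cast; ring]
        exact ih (j + 1) f (by push_cast; omega) (by omega)
      simp [fscan, gL, hb, hcell, hcrop, hs', hrec]

theorem rowScanGo_getD (base : List String) :
    ∀ (l : List String) (k : Nat), l = base.drop k →
      ∀ (j : Nat), j < l.length →
        (vsRowScanGo (gL base k) l).getD j none = gL base (k + j) := by
  intro l
  induction l with
  | nil => intro k hl j hj; simp at hj
  | cons c rest ih =>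
    intro k hl j hj
    have hck : base[k]? = some c := by
      have h0 : (base.drop k)[0]? = base[k]? := by
        simp
      rw [← hl] at h0; simpa using h0.symm
    have hrest : rest = base.drop (k + 1) := by
      have hd : base.drop (k + 1) = (base.drop k).drop 1 := by
        rw [List.drop_drop]
      rw [hd, ← hl]; rfl
    cases j with
    | zero => simp [vsRowScanGo]
    | succ j =>
      have hgd : base.getD k "" = c := by
        rw [List.getD_eq_getElem?_getD, hck]; rfl
      
      have hgd' := hgd
      simp only [List.getD_eq_getElem?_getD] at hgd'
      have hstep : (if vsShooter c then some c else gL base k) = gL base (k + 1) := by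
        simp [gL, hgd']
      simp only [vsRowScanGo, List.getD_cons_succ]
      rw [hstep, ih (k + 1) hrest j (by simpa using hj)]
      congr 1
      omega

theorem tableUpGo_length (n : Nat) (dy : Int) :
    ∀ (rows : List (List String)) (prev : List (Option String)),
      (vsTableUpGo n dy prev rows).length = rows.length := by
  intro rows
  induction rows with
  | nil => intro prev; rfl
  | cons brow rest ih => intro prev; simp [vsTableUpGo, ih]

theorem gUp_oob (board : List (List String)) (n dy : Int) (i : Nat) (j : Int)
    (h : ¬(0 ≤ j ∧ j < n)) : gUp board n dy i j = none := by
  cases i <;> simp [gUp, h]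

theorem shiftCombine_getD (brow : List String) (prev : List (Option String)) (dy : Int)
    (n : Nat) (j : Nat) (hj : j < n) :
    (vsShiftCombine brow prev dy n).getD j none
      = (if 0 ≤ (j : Int) + dy ∧ (j : Int) + dy < (n : Int) then
          (if vsShooter (brow.getD ((j : Int) + dy).toNat "") then
            some (brow.getD ((j : Int) + dy).toNat "")
          else prev.getD ((j : Int) + dy).toNat none)
        else none) := by
  unfold vsShiftCombine
  rw [List.getD_eq_getElem?_getD, List.getElem?_map, List.getElem?_range hj]
  rfl

theorem tableUpGo_getD (board : List (List String)) (dy : Int) :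
    ∀ (rows : List (List String)) (k : Nat) (prev : List (Option String)),
      rows = board.drop k →
      (∀ j : Nat, j < board.length →
        prev.getD j none = PspecUp board (board.length : Int) dy k ((j : Int) + dy)) →
      ∀ (i j : Nat), i < rows.length → j < board.length →
        ((vsTableUpGo board.length dy prev rows).getD i []).getD j none
          = PspecUp board (board.length : Int) dy (k + i) ((j : Int) + dy) := by
  intro rows
  induction rows with
  | nil => intro k prev hl hprev i j hi hj; simp at hi
  | cons brow rest ih =>
    intro k prev hl hprev i j hi hj
    have hbrow : brow = board.getD k [] := by
      have h0 : (board.drop k)[0]? = board[k]? := by simp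
      rw [← hl] at h0
      rw [List.getD_eq_getElem?_getD, ← h0]; rfl
    have hkN : k < board.length := by
      have : (board.drop k).length = board.length - k := by simp
      rw [← hl] at this; simp at this; omega
    have hrest : rest = board.drop (k + 1) := by
      have hd : board.drop (k + 1) = (board.drop k).drop 1 := by rw [List.drop_drop]
      rw [hd, ← hl]; rfl
    cases i with
    | zero =>
      simpa [vsTableUpGo] using hprev j hj
    | succ i =>
      have hprev' : ∀ j' : Nat, j' < board.length →
          (vsShiftCombine brow prev dy board.length).getD j' none
            = PspecUp board (board.length : Int) dy (k + 1) ((j' : Int) + dy) := by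
        intro j' hj'
        rw [shiftCombine_getD _ _ _ _ _ hj']
        by_cases hcol : 0 ≤ (j' : Int) + dy ∧ (j' : Int) + dy < ((board.length : Nat) : Int)
        · have ht : ((((j' : Int) + dy).toNat : Nat) : Int) = (j' : Int) + dy :=
            Int.toNat_of_nonneg hcol.1
          have htn : ((j' : Int) + dy).toNat < board.length := by omega
          have hcell : vsCell board (k : Int) ((j' : Int) + dy)
              = brow.getD ((j' : Int) + dy).toNat "" := by
            unfold vsCell; rw [hbrow]; simp
          have hprevj := hprev (((j' : Int) + dy).toNat) htn
          rw [ht] at hprevj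
          simp only [List.getD_eq_getElem?_getD] at hprevj
          cases k with
          | zero =>
            simp only [PspecUp] at hprevj ⊢
            rw [if_pos hcol]
            have hcell0 : vsCell board 0 ((j' : Int) + dy)
                = brow.getD ((j' : Int) + dy).toNat "" := by
              simpa using hcell
            simp [gUp, hcol, hcell0, hprevj]
          | succ k' =>
            simp only [PspecUp] at hprevj ⊢
            rw [if_pos hcol]
            have hcell' := hcell
            push_cast at hcell'
            simp [gUp, hcol, hcell', hprevj]
        · rw [if_neg hcol]
          simp only [PspecUp]
          rw [gUp_oob board _ dy k ((j' : Int) + dy) (by exact_mod_cast hcol)]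
      have := ih (k + 1) (vsShiftCombine brow prev dy board.length) hrest hprev' i j
        (by simpa using hi) hj
      simpa [vsTableUpGo, Nat.add_assoc, Nat.add_comm 1 i] using this

theorem tableUp_getD (board : List (List String)) (dy : Int) (i j : Nat)
    (hi : i < board.length) (hj : j < board.length) :
    ((vsTableUp board board.length dy).getD i []).getD j none
      = PspecUp board (board.length : Int) dy i ((j : Int) + dy) := by
  have h := tableUpGo_getD board dy board 0 (List.replicate board.length none) (by simp)
    (fun j' hj' => by simp [PspecUp]) i j hi hj
  simpa [vsTableUp] using h

theorem tableDown_getD (board : List (List String)) (dy : Int) (i j : Nat)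
    (hi : i < board.length) (hj : j < board.length) :
    ((vsTableDown board board.length dy).getD i []).getD j none
      = PspecUp board.reverse (board.length : Int) dy (board.length - 1 - i) ((j : Int) + dy) := by
  have hlen : (vsTableUp board.reverse board.length dy).length = board.length := by
    unfold vsTableUp; rw [tableUpGo_length]; simp
  have hrev : (vsTableDown board board.length dy).getD i []
      = (vsTableUp board.reverse board.length dy).getD (board.length - 1 - i) [] := by
    unfold vsTableDown
    rw [List.getD_eq_getElem?_getD, List.getD_eq_getElem?_getD,
      List.getElem?_reverse (by rw [hlen]; omega), hlen]
  rw [hrev]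
  have h := tableUp_getD board.reverse dy (board.length - 1 - i) j
    (by simp; omega) (by simp; omega)
  simpa using h

theorem rowScanGo_length (prev : Option String) :
    ∀ (l : List String), (vsRowScanGo prev l).length = l.length := by
  intro l
  induction l generalizing prev with
  | nil => rfl
  | cons c rest ih => simp [vsRowScanGo, ih]

theorem map_getD_row {α β : Type} [Inhabited α] [Inhabited β] (l : List α) (f : α → β)
    (i : Nat) (hi : i < l.length) (d : α) (d' : β) :
    (l.map f).getD i d' = f (l.getD i d) := by
  rw [List.getD_eq_getElem?_getD, List.getD_eq_getElem?_getD, List.getElem?_map]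
  rw [List.getElem?_eq_getElem hi]
  rfl

theorem gL_take (row : List String) (n : Nat) :
    ∀ (j : Nat), j ≤ n → gL (row.take n) j = gL row j := by
  intro j
  induction j with
  | zero => intro h; rfl
  | succ j ih =>
    intro h
    have hg : (row.take n).getD j "" = row.getD j "" := by
      rw [List.getD_eq_getElem?_getD, List.getD_eq_getElem?_getD,
        List.getElem?_take_of_lt (by omega)]
    simp only [List.getD_eq_getElem?_getD] at hg
    simp [gL, hg, ih (by omega)]

theorem map_contains {α β : Type} [BEq β] [LawfulBEq β] (l : List α) (F : α → β) (x : β) :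
    (l.map F).contains x = l.any (fun d => F d == x) := by
  induction l with
  | nil => rfl
  | cons a t ih =>
    simp only [List.map_cons, List.contains_cons, List.any_cons, ih]
    congr 1
    by_cases h : F a = x
    · simp [h]
    · simp [h, Ne.symm h]

theorem map_count {α β : Type} [BEq β] [LawfulBEq β] (l : List α) (F : α → β) (x : β) :
    (l.map F).count x = l.countP (fun d => F d == x) := by
  induction l with
  | nil => rfl
  | cons a t ih =>
    simp only [List.map_cons, List.count_cons, List.countP_cons, ih]

theorem list_all_congr {α : Type} (l : List α) (f g : α → Bool)
    (h : ∀ x ∈ l, f x = g x) : l.all f = l.all g := by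
  induction l with
  | nil => rfl
  | cons a t ih =>
    simp only [List.all_cons, h a (by simp), ih (fun x hx => h x (by simp [hx]))]

theorem dirval_up (board : List (List String)) (dy : Int) (i j : Nat)
    (hi : i < board.length) :
    fscan board (board.length : Int) (-1) dy (board.length + 1) ((i : Int) + -1) ((j : Int) + dy)
      = PspecUp board (board.length : Int) dy i ((j : Int) + dy) := by
  cases i with
  | zero =>
    rw [show ((0 : Nat) : Int) + -1 = -1 by simp]
    rw [fscan_oob _ _ _ _ _ _ _ (by omega)]
    rfl
  | succ i' =>
    rw [show ((i' + 1 : Nat) : Int) + -1 = ((i' : Nat) : Int) by push_cast; ring]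
    simp only [PspecUp]
    exact fscan_up board _ dy i' (board.length + 1) ((j : Int) + dy) (by omega) (by omega)

theorem dirval_down (board : List (List String)) (dy : Int) (i j : Nat)
    (hi : i < board.length) :
    fscan board (board.length : Int) 1 dy (board.length + 1) ((i : Int) + 1) ((j : Int) + dy)
      = PspecUp board.reverse (board.length : Int) dy (board.length - 1 - i) ((j : Int) + dy) := by
  rw [fscan_down board dy (board.length + 1) ((i : Int) + 1) ((j : Int) + dy)]
  by_cases hlast : i + 1 = board.length
  · rw [show (board.length : Int) - 1 - ((i : Int) + 1) = -1 by omega]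
    rw [fscan_oob _ _ _ _ _ _ _ (by omega)]
    rw [show board.length - 1 - i = 0 by omega]
    rfl
  · have hk : ((board.length - 2 - i : Nat) : Int) = (board.length : Int) - 1 - ((i : Int) + 1) := by
      omega
    rw [← hk]
    rw [show board.length - 1 - i = (board.length - 2 - i) + 1 by omega]
    simp only [PspecUp]
    exact fscan_up board.reverse _ dy _ _ _ (by omega) (by omega)

theorem dirval_left (board : List (List String)) (i j : Nat)
    (hi : i < board.length) (hj : j < board.length) :
    fscan board (board.length : Int) 0 (-1) (board.length + 1) (i : Int) ((j : Int) + -1)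
      = gL (board.getD i []) j := by
  rw [show ((j : Int) + -1) = (j : Int) - 1 by ring]
  have h := fscan_left board (board.length : Int) (i : Int) ⟨by omega, by omega⟩ j
    (board.length + 1) (by omega) (by omega)
  simpa using h

theorem dirval_right (board : List (List String)) (i j : Nat)
    (hi : i < board.length) (hj : j < board.length)
    (hlen : board.length ≤ (board.getD i []).length) :
    fscan board (board.length : Int) 0 1 (board.length + 1) (i : Int) ((j : Int) + 1)
      = gL ((board.getD i []).take board.length).reverse (board.length - 1 - j) := by
  rw [show ((j : Int) + 1) = ((j + 1 : Nat) : Int) by push_cast; ring]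
  exact fscan_right board (i : Int) (board.getD i []) ⟨by omega, by omega⟩ (by simp) hlen
    (board.length - 1 - j) (j + 1) (board.length + 1) (by push_cast; omega) (by omega)

theorem lookup_left (board : List (List String)) (i j : Nat)
    (hi : i < board.length) (hj : j < board.length)
    (hlen : board.length ≤ (board.getD i []).length) :
    ((board.map (fun r => vsRowScanLeft r board.length)).getD i []).getD j none
      = gL (board.getD i []) j := by
  rw [map_getD_row board _ i hi []]
  unfold vsRowScanLeft
  have h := rowScanGo_getD ((board.getD i []).take board.length)
    ((board.getD i []).take board.length) 0 (by simp) j (by rw [List.length_take]; omega)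
  rw [show gL ((board.getD i []).take board.length) 0 = none from rfl] at h
  rw [h, Nat.zero_add, gL_take _ _ j (by omega)]

theorem lookup_right (board : List (List String)) (i j : Nat)
    (hi : i < board.length) (hj : j < board.length)
    (hlen : board.length ≤ (board.getD i []).length) :
    ((board.map (fun r => vsRowScanRight r board.length)).getD i []).getD j none
      = gL ((board.getD i []).take board.length).reverse (board.length - 1 - j) := by
  rw [map_getD_row board _ i hi []]
  unfold vsRowScanRight
  have hblen : (((board.getD i []).take board.length).reverse).length = board.length := by
    rw [List.length_reverse, List.length_take]; omega
  have hrev : ∀ (L : List (Option String)), L.length = board.length →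
      L.reverse.getD j none = L.getD (board.length - 1 - j) none := by
    intro L hL
    rw [List.getD_eq_getElem?_getD, List.getD_eq_getElem?_getD,
      List.getElem?_reverse (by omega), hL]
  rw [hrev _ (by rw [rowScanGo_length, hblen])]
  have h := rowScanGo_getD (((board.getD i []).take board.length).reverse)
    (((board.getD i []).take board.length).reverse) 0 (by simp)
    (board.length - 1 - j) (by rw [hblen]; omega)
  rw [show gL (((board.getD i []).take board.length).reverse) 0 = none from rfl] at h
  rw [h, Nat.zero_add]

theorem cell_eq (board : List (List String)) (hpre : Pre_validate_standoff board)
    (i j : Nat) (hi : i < board.length) (hj : j < board.length) :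
    (let c := (board.getD i []).getD j ""
     if c = "B" ∨ c = "P" then
       let e := count_enemies_in_sight board (i : Int) (j : Int) c
       !(decide (e = -1) || decide (e < 2))
     else true)
    = (let g := (board.getD i []).getD j ""
       if vsShooter g then
         let firsts := ([vsTableUp board board.length 0, vsTableDown board board.length 0,
           board.map (fun r => vsRowScanLeft r board.length),
           board.map (fun r => vsRowScanRight r board.length),
           vsTableUp board board.length (-1), vsTableUp board board.length 1,
           vsTableDown board board.length (-1), vsTableDown board board.length 1]).map
             (fun t => (t.getD i []).getD j none)
         if firsts.contains (some g) then false
         else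
           let enemy : String := if g = "P" then "B" else "P"
           decide (2 ≤ firsts.count (some enemy))
       else true) := by
  simp only []
  by_cases hBP : (board.getD i []).getD j "" = "B" ∨ (board.getD i []).getD j "" = "P"
  case neg =>
    have hsh : vsShooter ((board.getD i []).getD j "") = false := by
      simp [vsShooter]; tauto
    rw [if_neg hBP, if_neg (show ¬(vsShooter ((board.getD i []).getD j "") = true) by
      rw [hsh]; simp)]
  case pos =>
    have hsh : vsShooter ((board.getD i []).getD j "") = true := by
      simp [vsShooter]; tauto
    have hmem : board.getD i [] ∈ board := by
      rw [List.getD_eq_getElem?_getD, List.getElem?_eq_getElem hi]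
      simp
    have hrow : board.length ≤ (board.getD i []).length := hpre _ hmem
    have hg : ((board.getD i []).getD j "" = "B" ∧
          (if (board.getD i []).getD j "" = "P" then "B" else "P") = "P") ∨
        ((board.getD i []).getD j "" = "P" ∧
          (if (board.getD i []).getD j "" = "P" then "B" else "P") = "B") := by
      rcases hBP with h | h
      · left; refine ⟨h, ?_⟩; rw [h]; simp
      · right; refine ⟨h, ?_⟩; rw [h]; simp
    have hA : count_enemies_in_sight board (i : Int) (j : Int) ((board.getD i []).getD j "")
        = if (vsDirs.any fun d => fscan board (board.length : Int) d.1 d.2 (board.length + 1)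
              ((i : Int) + d.1) ((j : Int) + d.2) == some ((board.getD i []).getD j "")) then -1
          else ((vsDirs.countP fun d => fscan board (board.length : Int) d.1 d.2 (board.length + 1)
              ((i : Int) + d.1) ((j : Int) + d.2)
                == some (if (board.getD i []).getD j "" = "P" then "B" else "P")) : Int) := by
      unfold count_enemies_in_sight
      rw [countGo_eq board (board.length : Int) _ _ hg (i : Int) (j : Int) vsDirs 0]
      simp only [Int.toNat_natCast, zero_add]
    have hu0 := (tableUp_getD board 0 i j hi hj).trans (dirval_up board 0 i j hi).symm
    have hd0 := (tableDown_getD board 0 i j hi hj).trans (dirval_down board 0 i j hi).symm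
    have hlf := (lookup_left board i j hi hj hrow).trans (dirval_left board i j hi hj).symm
    have hrt := (lookup_right board i j hi hj hrow).trans
      (dirval_right board i j hi hj hrow).symm
    have hum := (tableUp_getD board (-1) i j hi hj).trans (dirval_up board (-1) i j hi).symm
    have hup := (tableUp_getD board 1 i j hi hj).trans (dirval_up board 1 i j hi).symm
    have hdm := (tableDown_getD board (-1) i j hi hj).trans (dirval_down board (-1) i j hi).symm
    have hdp := (tableDown_getD board 1 i j hi hj).trans (dirval_down board 1 i j hi).symm
    have hmap : ([vsTableUp board board.length 0, vsTableDown board board.length 0,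
           board.map (fun r => vsRowScanLeft r board.length),
           board.map (fun r => vsRowScanRight r board.length),
           vsTableUp board board.length (-1), vsTableUp board board.length 1,
           vsTableDown board board.length (-1), vsTableDown board board.length 1]).map
             (fun t => (t.getD i []).getD j none)
        = vsDirs.map (fun d => fscan board (board.length : Int) d.1 d.2 (board.length + 1)
            ((i : Int) + d.1) ((j : Int) + d.2)) := by
      simp only [vsDirs, List.map_cons, List.map_nil]
      rw [hu0, hd0, hlf, hrt, hum, hup, hdm, hdp]
      norm_num
    rw [if_pos hBP, if_pos hsh, hA]
    simp only [hmap, map_contains, map_count]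
    by_cases hany : (vsDirs.any fun d => fscan board (board.length : Int) d.1 d.2
        (board.length + 1) ((i : Int) + d.1) ((j : Int) + d.2)
          == some ((board.getD i []).getD j "")) = true
    · simp only [if_pos hany]
      norm_num
    · simp only [if_neg hany]
      by_cases h2 : 2 ≤ (vsDirs.countP (fun d => fscan board (board.length : Int) d.1 d.2
          (board.length + 1) ((i : Int) + d.1) ((j : Int) + d.2)
            == some (if (board.getD i []).getD j "" = "P" then "B" else "P")))
      · rw [decide_eq_false (show ¬(((vsDirs.countP (fun d => fscan board (board.length : Int) d.1 d.2
          (board.length + 1) ((i : Int) + d.1) ((j : Int) + d.2)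
            == some (if (board.getD i []).getD j "" = "P" then "B" else "P"))) : Int) = -1) by omega),
            decide_eq_false (show ¬(((vsDirs.countP (fun d => fscan board (board.length : Int) d.1 d.2
          (board.length + 1) ((i : Int) + d.1) ((j : Int) + d.2)
            == some (if (board.getD i []).getD j "" = "P" then "B" else "P"))) : Int) < 2) by omega),
            decide_eq_true h2]
        rfl
      · rw [decide_eq_false (show ¬(((vsDirs.countP (fun d => fscan board (board.length : Int) d.1 d.2
          (board.length + 1) ((i : Int) + d.1) ((j : Int) + d.2)
            == some (if (board.getD i []).getD j "" = "P" then "B" else "P"))) : Int) = -1) by omega),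
            decide_eq_true (show (((vsDirs.countP (fun d => fscan board (board.length : Int) d.1 d.2
          (board.length + 1) ((i : Int) + d.1) ((j : Int) + d.2)
            == some (if (board.getD i []).getD j "" = "P" then "B" else "P"))) : Int) < 2) by omega),
            decide_eq_false h2]
        rfl

-- ===== VERDICT (by name: the statement is the Claim_ definition above) =====
theorem validate_standoff_spec : Claim_equal_validate_standoff := by
  intro board hdom hpre
  unfold Spec_validate_standoff validate_standoff validate_standoff_alt
  refine list_all_congr _ _ _ (fun i hi => ?_)
  refine list_all_congr _ _ _ (fun j hj => ?_)
  exact cell_eq board hpre i j (List.mem_range.mp hi) (List.mem_range.mp hj)
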